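-- pv_equiv track=rewrite | github.com/gugeldot/PS-LAB2025 | Serrano_Torres_Palomo_Patrones_2025/App/src/core/well.py | _calculate_points_by_difficulty
-- ===== SOURCE A (Python) =====
-- def _calculate_points_by_difficulty(num):
--     """
--     Calcula puntos basados en el número + bonus por dificultad.
--     - Puntos base: el número mismo
--     - Bonus: ×1.2 (redondeado) si es primo (más difícil de generar)
--     """
--     if num <= 1:
--         return num
--
--     # Verificar si es primo
--     def is_prime(n):
--         if n < 2:
--             return False
--         if n == 2:
--             return True
--         if n % 2 == 0:
--             return False
--         for i in range(3, int(n**0.5) + 1, 2):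
--             if n % i == 0:
--                 return False
--         return True
--
--     # Puntos base = el número consumido
--     points = num
--
--     # Bonus por ser primo: multiplicar por 1.2 y redondear
--     if is_prime(num):
--         points = round(num * 1.2)
--
--     return points
-- ===== SOURCE B (Python) =====
-- def _calculate_points_by_difficulty(num):
--     if num <= 1:
--         return num
--     # integer sqrt bound, computed incrementally
--     limit = 1
--     while (limit + 1) * (limit + 1) <= num:
--         limit += 1
--     # sieve of Eratosthenes up to limit: collect the primes <= limit
--     composite = [False] * (limit + 1)
--     primes = []
--     for p in range(2, limit + 1):
--         if not composite[p]:
--             primes.append(p)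
--             for m in range(p * p, limit + 1, p):
--                 composite[m] = True
--     # num is prime iff no sieved prime divides it
--     if all(num % p for p in primes):
--         return round(num * 1.2)
--     return num
-- ===== Notes on version B (the rewrite author's own statement) =====
-- stated objective: alternative
-- what changed: Replaces A's direct trial division of num (sqrt-bounded odd-step loop inside a nested helper) with a sieve of Eratosthenes up to isqrt(num) that marks composites in a boolean table, collecting the primes, and then tests num for divisibility only against those sieved primes.
import Mathlib
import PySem

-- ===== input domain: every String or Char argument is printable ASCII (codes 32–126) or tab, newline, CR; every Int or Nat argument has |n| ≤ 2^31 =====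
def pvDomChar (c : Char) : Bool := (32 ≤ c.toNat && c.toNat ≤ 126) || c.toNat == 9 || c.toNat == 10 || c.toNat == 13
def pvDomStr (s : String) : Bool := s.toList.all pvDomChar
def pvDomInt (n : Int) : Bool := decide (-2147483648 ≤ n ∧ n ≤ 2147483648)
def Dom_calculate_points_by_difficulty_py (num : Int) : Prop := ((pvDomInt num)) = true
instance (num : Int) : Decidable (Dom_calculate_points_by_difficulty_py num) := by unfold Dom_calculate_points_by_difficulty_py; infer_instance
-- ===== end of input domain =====

-- B replaces A's sqrt-bounded odd-step trial division by a sieve of Eratosthenes up to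
-- isqrt(num), testing num only against the sieved primes; alternative algorithm, not faster.


-- ===== PORT A =====
-- round(num * 1.2): exact integer form of CPython's round on the float num*1.2, for the
-- inputs on which it is reached here (2 ≤ num ≤ 2^31: the float never lands on a .5 tie);
-- checked against CPython on that range.
def pvRound12 (num : Int) : Int := PySem.Int.floordiv (6 * num + 2) 5

-- is_prime helper of A: int(n**0.5) equals Nat.sqrt on 0 ≤ n ≤ 2^31 (checked against CPython)
def pvIsPrimeA (n : Int) : Bool :=
  if n < 2 then false
  else if n = 2 then true
  else if PySem.Int.mod n 2 = 0 then false
  else (PySem.List.pyRange 3 ((Nat.sqrt n.toNat : Int) + 1) 2).all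
        (fun i => PySem.Int.mod n i != 0)

def calculate_points_by_difficulty_py (num : Int) : Int :=
  if num ≤ 1 then num
  else if pvIsPrimeA num then pvRound12 num else num

-- ===== PORT B =====
-- the 'while (limit+1)*(limit+1) <= num: limit += 1' loop of Source B
def pvIsqrt (num limit : Int) : Int :=
  if (limit + 1) * (limit + 1) ≤ num then pvIsqrt num (limit + 1) else limit
termination_by (num - limit).toNat
decreasing_by
  have h : limit < num := by nlinarith
  omega

-- one iteration of Source B's 'for p in range(2, limit+1)': the composite table and primes list
def pvSieveStep (limit : Int) (st : List Bool × List Int) (p : Int) : List Bool × List Int :=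
  if st.1.getD p.toNat false = false then
    ((PySem.List.pyRange (p * p) (limit + 1) p).foldl (fun c m => c.set m.toNat true) st.1,
     st.2 ++ [p])
  else st

-- the sieve of Eratosthenes of Source B: the primes ≤ limit in increasing order
def pvPrimesUpto (limit : Int) : List Int :=
  ((PySem.List.pyRange 2 (limit + 1) 1).foldl (pvSieveStep limit)
    (List.replicate (limit + 1).toNat false, [])).2

def calculate_points_by_difficulty_py_alt (num : Int) : Int :=
  if num ≤ 1 then num
  else if (pvPrimesUpto (pvIsqrt num 1)).all (fun p => PySem.Int.mod num p != 0)
       then pvRound12 num else num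

-- ===== PRECONDITION & SPEC =====
def Spec_calculate_points_by_difficulty_py (num : Int) (out : Int) : Prop := out = calculate_points_by_difficulty_py_alt num
instance (num : Int) (out : Int) : Decidable (Spec_calculate_points_by_difficulty_py num out) := by unfold Spec_calculate_points_by_difficulty_py; infer_instance

-- ===== CLAIM (what is proved, stated in full; the proofs are below) =====
def Claim_equal_calculate_points_by_difficulty_py : Prop := ∀ (num : Int), Dom_calculate_points_by_difficulty_py num → Spec_calculate_points_by_difficulty_py num (calculate_points_by_difficulty_py num)

-- ===== LEMMAS AND PROOFS =====

-- spec of the isqrt loop: for 1 ≤ limit with limit² ≤ num, the result r has r² ≤ num < (r+1)²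
theorem pvIsqrt_spec (num : Int) : ∀ (fuel : Nat) (limit : Int), (num - limit).toNat ≤ fuel →
    1 ≤ limit → limit * limit ≤ num →
    1 ≤ pvIsqrt num limit ∧ pvIsqrt num limit * pvIsqrt num limit ≤ num ∧
      num < (pvIsqrt num limit + 1) * (pvIsqrt num limit + 1) := by
  intro fuel
  induction fuel with
  | zero =>
    intro limit hf h1 h2
    have hgrow : limit + 1 ≤ (limit + 1) * (limit + 1) := by nlinarith
    have : ¬ (limit + 1) * (limit + 1) ≤ num := by omega
    rw [pvIsqrt, if_neg this]
    exact ⟨h1, h2, by omega⟩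
  | succ k ih =>
    intro limit hf h1 h2
    rw [pvIsqrt]
    by_cases h : (limit + 1) * (limit + 1) ≤ num
    · rw [if_pos h]
      have hlt : limit < num := by nlinarith
      exact ih (limit + 1) (by omega) (by omega) h
    · rw [if_neg h]
      exact ⟨h1, h2, by omega⟩

-- the invariant carried by the sieve loop at candidate k
def pvSieveInv (limit k : Int) (st : List Bool × List Int) : Prop :=
  st.1.length = (limit + 1).toNat ∧
  (∀ m : Nat, st.1.getD m false = true ↔
     (m < (limit + 1).toNat ∧ ∃ q : Int, 2 ≤ q ∧ q < k ∧ Nat.Prime q.toNat ∧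
        q * q ≤ (m : Int) ∧ q ∣ (m : Int))) ∧
  (∀ p : Int, p ∈ st.2 ↔ (2 ≤ p ∧ p < k ∧ Nat.Prime p.toNat))

-- marking a list of nonnegative indices: what the table reads afterwards
theorem pvFoldlSet_getD (l : List Int) (c : List Bool) (m : Nat) (hpos : ∀ x ∈ l, 0 ≤ x) :
    (l.foldl (fun c x => c.set x.toNat true) c).getD m false = true ↔
      (c.getD m false = true ∨ (m < c.length ∧ (m : Int) ∈ l)) := by
  induction l generalizing c with
  | nil => simp
  | cons x xs ih =>
    have hx0 : 0 ≤ x := hpos x (List.mem_cons_self)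
    simp only [List.foldl_cons]
    rw [ih _ (fun y hy => hpos y (List.mem_cons_of_mem _ hy))]
    have hlen : (c.set x.toNat true).length = c.length := List.length_set ..
    rw [hlen]
    have hget : (c.set x.toNat true).getD m false = true ↔
        (c.getD m false = true ∨ (m < c.length ∧ m = x.toNat)) := by
      simp only [List.getD_eq_getElem?_getD, List.getElem?_set]
      by_cases he : x.toNat = m
      · subst he
        by_cases hm : x.toNat < c.length <;> simp [hm]
      · simp [he, Ne.symm he]
    rw [hget]
    have hxm : ((m : Int) = x) ↔ (m = x.toNat) := by omega
    simp only [List.mem_cons, hxm]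
    tauto

-- marking indices preserves the table's length
theorem pvFoldlSet_length (l : List Int) (c : List Bool) :
    (l.foldl (fun c x => c.set x.toNat true) c).length = c.length := by
  induction l generalizing c with
  | nil => rfl
  | cons x xs ih => simp [List.foldl_cons, ih, List.length_set]

-- one sieve step preserves the invariant (candidate k, 2 ≤ k ≤ limit)
theorem pvSieveStep_inv (limit k : Int) (st : List Bool × List Int)
    (h2 : 2 ≤ k) (hk : k ≤ limit) (hinv : pvSieveInv limit k st) :
    pvSieveInv limit (k + 1) (pvSieveStep limit st k) := by
  obtain ⟨hlen, hcomp, hprimes⟩ := hinv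
  unfold pvSieveStep
  by_cases hc : st.1.getD k.toNat false = false
  · -- k is unmarked: k is prime
    have hknot : ¬ ∃ q : Int, 2 ≤ q ∧ q < k ∧ Nat.Prime q.toNat ∧ q * q ≤ k ∧ q ∣ k := by
      rintro ⟨q, hq2, hqk, hqp, hqsq, hqd⟩
      have : st.1.getD k.toNat false = true := by
        rw [hcomp]
        have hkm : ((k.toNat : Int)) = k := Int.toNat_of_nonneg (by omega)
        exact ⟨by omega, q, hq2, hqk, hqp, by rw [hkm]; exact hqsq, by rw [hkm]; exact hqd⟩
      rw [this] at hc; simp at hc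
    have hkprime : Nat.Prime k.toNat := by
      by_contra hnp
      have hpos : 0 < k.toNat := by omega
      have hm := Nat.minFac_dvd k.toNat
      have hk1 : k.toNat ≠ 1 := by omega
      have hmp := Nat.minFac_prime hk1
      have hmsq : k.toNat.minFac ^ 2 ≤ k.toNat := Nat.minFac_sq_le_self hpos hnp
      have hm2 : 2 ≤ k.toNat.minFac := hmp.two_le
      refine hknot ⟨(k.toNat.minFac : Int), by exact_mod_cast hm2, ?_, by simpa, ?_, ?_⟩
      · have : k.toNat.minFac < k.toNat := by nlinarith [sq_nonneg k.toNat.minFac]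
        omega
      · have : ((k.toNat.minFac : Int)) * ((k.toNat.minFac : Int)) ≤ ((k.toNat : Int)) := by
          exact_mod_cast (by nlinarith : k.toNat.minFac * k.toNat.minFac ≤ k.toNat)
        omega
      · have : ((k.toNat.minFac : Int)) ∣ ((k.toNat : Int)) := Int.natCast_dvd_natCast.mpr hm
        rwa [Int.toNat_of_nonneg (by omega : (0:Int) ≤ k)] at this
    rw [if_pos hc]
    refine ⟨?_, ?_, ?_⟩
    · show (_ : List Bool).length = _
      rw [pvFoldlSet_length]
      exact hlen
    · intro m
      rw [pvFoldlSet_getD _ _ _ (by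
        intro x hx
        rw [PySem.List.mem_pyRange_iff_of_pos (by omega)] at hx
        nlinarith [hx.1]), hcomp, hlen]
      constructor
      · rintro (⟨hm, q, hq⟩ | ⟨hm, hmem⟩)
        · exact ⟨hm, q, hq.1, by omega, hq.2.2⟩
        · rw [PySem.List.mem_pyRange_iff_of_pos (by omega)] at hmem
          obtain ⟨ha, hb, j, hj⟩ := hmem
          exact ⟨hm, k, by omega, by omega, hkprime, ha, ⟨j + k, by linarith [hj]⟩⟩
      · rintro ⟨hm, q, hq2, hqk1, hqp, hqsq, hqd⟩
        by_cases hqk : q < k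
        · exact Or.inl ⟨hm, q, hq2, hqk, hqp, hqsq, hqd⟩
        · have hqe : q = k := by omega
          subst hqe
          refine Or.inr ⟨hm, ?_⟩
          rw [PySem.List.mem_pyRange_iff_of_pos (by omega)]
          obtain ⟨j, hj⟩ := hqd
          exact ⟨hqsq, by omega, ⟨j - q, by linarith [hj]⟩⟩
    · intro p
      simp only [List.mem_append, List.mem_singleton, hprimes]
      constructor
      · rintro (⟨h1, h2', h3⟩ | rfl)
        · exact ⟨h1, by omega, h3⟩
        · exact ⟨h2, by omega, hkprime⟩
      · rintro ⟨h1, h2', h3⟩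
        by_cases hp : p < k
        · exact Or.inl ⟨h1, hp, h3⟩
        · exact Or.inr (by omega)
  · -- k is marked: k is composite, nothing changes
    rw [if_neg hc]
    have hcm : st.1.getD k.toNat false = true := by
      cases h : st.1.getD k.toNat false
      · exact absurd h hc
      · rfl
    rw [hcomp] at hcm
    obtain ⟨-, q, hq2, hqk, hqp, hqsq, hqd⟩ := hcm
    have hkm : ((k.toNat : Int)) = k := Int.toNat_of_nonneg (by omega)
    rw [hkm] at hqsq hqd
    have hknp : ¬ Nat.Prime k.toNat := by
      intro hp
      have hdN : q.toNat ∣ k.toNat := by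
        have : ((q.toNat : Int)) ∣ ((k.toNat : Int)) := by
          rw [hkm, Int.toNat_of_nonneg (by omega : (0:Int) ≤ q)]; exact hqd
        exact_mod_cast this
      have := (Nat.prime_def_lt.mp hp).2 q.toNat (by omega) hdN
      omega
    refine ⟨hlen, ?_, ?_⟩
    · intro m
      rw [hcomp]
      constructor
      · rintro ⟨hm, q', h1, h2', h3, h4, h5⟩
        exact ⟨hm, q', h1, by omega, h3, h4, h5⟩
      · rintro ⟨hm, q', h1, h2', h3, h4, h5⟩
        by_cases hq' : q' < k
        · exact ⟨hm, q', h1, hq', h3, h4, h5⟩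
        · have : q' = k := by omega
          subst this; exact absurd h3 hknp
    · intro p
      rw [hprimes]
      constructor
      · rintro ⟨h1, h2', h3⟩; exact ⟨h1, by omega, h3⟩
      · rintro ⟨h1, h2', h3⟩
        refine ⟨h1, ?_, h3⟩
        by_cases hp : p < k
        · exact hp
        · have : p = k := by omega
          subst this; exact absurd h3 hknp

-- the whole sieve loop establishes the invariant at limit+1
theorem pvSieve_loop (limit : Int) : ∀ (fuel : Nat) (k : Int) (st : List Bool × List Int),
    (limit + 1 - k).toNat ≤ fuel → 2 ≤ k → pvSieveInv limit k st →
    pvSieveInv limit (max (limit + 1) k)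
      ((PySem.List.pyRange k (limit + 1) 1).foldl (pvSieveStep limit) st) := by
  intro fuel
  induction fuel with
  | zero =>
    intro k st hf h2 hinv
    have hk : limit + 1 ≤ k := by omega
    rw [PySem.List.pyRange_one_eq_nil (by omega), max_eq_right hk]
    exact hinv
  | succ n ih =>
    intro k st hf h2 hinv
    by_cases hk : k < limit + 1
    · rw [PySem.List.pyRange_one_cons hk, List.foldl_cons]
      have h' := ih (k + 1) (pvSieveStep limit st k) (by omega) (by omega)
        (pvSieveStep_inv limit k st h2 (by omega) hinv)
      rw [max_eq_left (by omega)] at h'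
      rw [max_eq_left (by omega)]
      exact h' 
    · rw [PySem.List.pyRange_one_eq_nil (by omega), max_eq_right (by omega)]
      exact hinv

-- the sieve's output: exactly the primes between 2 and limit
theorem pvPrimesUpto_mem (limit : Int) (h1 : 1 ≤ limit) (p : Int) :
    p ∈ pvPrimesUpto limit ↔ (2 ≤ p ∧ p ≤ limit ∧ Nat.Prime p.toNat) := by
  have hinit : pvSieveInv limit 2 (List.replicate (limit + 1).toNat false, []) := by
    refine ⟨List.length_replicate, ?_, by
      intro p
      simp only [List.not_mem_nil, false_iff]
      rintro ⟨hp1, hp2, -⟩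
      omega⟩
    intro m
    constructor
    · intro h
      by_cases hm : m < (limit + 1).toNat
      · rw [List.getD_eq_getElem?_getD, List.getElem?_replicate, if_pos hm] at h
        simp at h
      · rw [List.getD_eq_getElem?_getD, List.getElem?_replicate, if_neg hm] at h
        simp at h
    · rintro ⟨-, q, hq2, hqk, -⟩; omega
  have := pvSieve_loop limit (limit + 1 - 2).toNat 2
    (List.replicate (limit + 1).toNat false, []) le_rfl le_rfl hinit
  rw [max_eq_left (by omega)] at this
  rw [pvPrimesUpto, this.2.2 p]
  constructor <;> rintro ⟨a, b, c⟩ <;> exact ⟨a, by omega, c⟩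

-- B's sieved-prime divisibility test says "prime" exactly on primes (for n ≥ 2)
theorem pvB_iff_prime (n : Int) (h2 : 2 ≤ n) :
    ((pvPrimesUpto (pvIsqrt n 1)).all (fun p => PySem.Int.mod n p != 0) = true)
      ↔ Nat.Prime n.toNat := by
  have hn : (n.toNat : Int) = n := Int.toNat_of_nonneg (by omega)
  obtain ⟨hL1, hLsq, hLlt⟩ := pvIsqrt_spec n (n - 1).toNat 1 le_rfl le_rfl (by nlinarith)
  set L := pvIsqrt n 1 with hLdef
  rw [List.all_eq_true]
  constructor
  · intro h
    by_contra hnp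
    have hm := Nat.minFac_dvd n.toNat
    have hn1 : n.toNat ≠ 1 := by omega
    have hmp := Nat.minFac_prime hn1
    have hmsq : n.toNat.minFac ^ 2 ≤ n.toNat := Nat.minFac_sq_le_self (by omega) hnp
    have hm2 : 2 ≤ n.toNat.minFac := hmp.two_le
    have hmZ : ((n.toNat.minFac : Int)) ∣ n := by
      rw [← hn]; exact_mod_cast hm
    have hmL : ((n.toNat.minFac : Int)) ≤ L := by
      by_contra hgt
      have : (L + 1) * (L + 1) ≤ ((n.toNat.minFac : Int)) * ((n.toNat.minFac : Int)) := by
        nlinarith [Int.natCast_nonneg n.toNat.minFac]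
      have hsq : ((n.toNat.minFac : Int)) * ((n.toNat.minFac : Int)) ≤ n := by
        rw [← hn]; exact_mod_cast (by nlinarith : n.toNat.minFac * n.toNat.minFac ≤ n.toNat)
      omega
    have hmem : ((n.toNat.minFac : Int)) ∈ pvPrimesUpto L := by
      rw [pvPrimesUpto_mem L hL1]
      exact ⟨by exact_mod_cast hm2, hmL, by simpa⟩
    have := h _ hmem
    simp only [bne_iff_ne, ne_eq, PySem.Int.mod_eq_zero_iff_dvd] at this
    exact this hmZ
  · intro hp q hmem
    rw [pvPrimesUpto_mem L hL1] at hmem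
    obtain ⟨hq2, hqL, -⟩ := hmem
    simp only [bne_iff_ne, ne_eq, PySem.Int.mod_eq_zero_iff_dvd]
    intro hdvd
    have hdN : q.toNat ∣ n.toNat := by
      have : ((q.toNat : Int)) ∣ ((n.toNat : Int)) := by
        rw [hn, Int.toNat_of_nonneg (by omega : (0:Int) ≤ q)]; exact hdvd
      exact_mod_cast this
    have hLn : L < n := by nlinarith
    have := (Nat.prime_def_lt.mp hp).2 q.toNat (by omega) hdN
    omega

-- A's sqrt-bounded odd-step test says "prime" exactly on primes (for n ≥ 2)
theorem pvA_iff_prime (n : Int) (h2 : 2 ≤ n) :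
    (pvIsPrimeA n = true) ↔ Nat.Prime n.toNat := by
  have hn : (n.toNat : Int) = n := Int.toNat_of_nonneg (by omega)
  unfold pvIsPrimeA
  rw [if_neg (by omega)]
  by_cases he : n = 2
  · subst he; decide
  · rw [if_neg he]
    by_cases hev : PySem.Int.mod n 2 = 0
    · rw [if_pos hev]
      rw [PySem.Int.mod_eq_zero_iff_dvd] at hev
      have h2d : 2 ∣ n.toNat := by
        have : ((2:Nat) : Int) ∣ ((n.toNat : Int)) := by rw [hn]; exact_mod_cast hev
        exact_mod_cast this
      simp only [Bool.false_eq_true, false_iff]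
      intro hp
      have := (Nat.prime_def_lt.mp hp).2 2 (by omega) h2d
      omega
    · rw [if_neg hev, List.all_eq_true]
      have hodd : ¬ (2:Int) ∣ n := by
        rw [← PySem.Int.mod_eq_zero_iff_dvd]; exact hev
      constructor
      · intro h
        rw [Nat.prime_def_le_sqrt]
        refine ⟨by omega, ?_⟩
        intro k hk hks hdvd
        have hdvdZ : (k : Int) ∣ n := by rw [← hn]; exact_mod_cast hdvd
        have hkodd : ¬ 2 ∣ k := by
          intro h2k
          exact hodd (dvd_trans (by exact_mod_cast h2k) hdvdZ)
        have hk3 : 3 ≤ k := by omega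
        have hmem : (k : Int) ∈ PySem.List.pyRange 3 ((Nat.sqrt n.toNat : Int) + 1) 2 := by
          rw [PySem.List.mem_pyRange_iff_of_pos (by omega)]
          have ha : (3:Int) ≤ (k : Int) := by exact_mod_cast hk3
          have hb : (k : Int) < (Nat.sqrt n.toNat : Int) + 1 := by
            have : (k : Int) ≤ (Nat.sqrt n.toNat : Int) := by exact_mod_cast hks
            omega
          have hc : (2:Int) ∣ (k : Int) - 3 := by
            obtain ⟨j, rfl⟩ : ∃ j, k = 2 * j + 1 := ⟨k / 2, by omega⟩
            exact ⟨(j : Int) - 1, by push_cast; ring⟩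
          exact ⟨ha, hb, hc⟩
        have := h _ hmem
        simp only [bne_iff_ne, ne_eq, PySem.Int.mod_eq_zero_iff_dvd] at this
        exact this hdvdZ
      · intro hp i hmem
        rw [PySem.List.mem_pyRange_iff_of_pos (by omega)] at hmem
        obtain ⟨hi3, hilt, -⟩ := hmem
        simp only [bne_iff_ne, ne_eq, PySem.Int.mod_eq_zero_iff_dvd]
        intro hdvd
        have hdvdN : i.toNat ∣ n.toNat := by
          have : ((i.toNat : Int)) ∣ ((n.toNat : Int)) := by
            rw [hn, Int.toNat_of_nonneg (by omega : (0:Int) ≤ i)]; exact hdvd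
          exact_mod_cast this
        have := (Nat.prime_def_le_sqrt.mp hp).2 i.toNat (by omega) (by omega) hdvdN
        exact this

-- ===== VERDICT (by name: the statement is the Claim_ definition above) =====
theorem calculate_points_by_difficulty_py_spec : Claim_equal_calculate_points_by_difficulty_py := by
  intro num _
  unfold Spec_calculate_points_by_difficulty_py
  unfold calculate_points_by_difficulty_py calculate_points_by_difficulty_py_alt
  by_cases h1 : num ≤ 1
  · simp [h1]
  · rw [if_neg h1, if_neg h1]
    have h2 : 2 ≤ num := by omega
    by_cases hp : Nat.Prime num.toNat
    · rw [if_pos ((pvA_iff_prime num h2).mpr hp),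
          if_pos ((pvB_iff_prime num h2).mpr hp)]
    · rw [if_neg (fun h => hp ((pvA_iff_prime num h2).mp h)),
          if_neg (fun h => hp ((pvB_iff_prime num h2).mp h))]
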